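-- pv_equiv track=rewrite | github.com/Meltwin/PCSI | TP 3/ex 4.py | nbSInYear
-- ===== SOURCE A (Python) =====
-- jours = [0,31,28,31,30,31,30,31,31,30,31,30,31]
--
-- joursB = [0,31,29,31,30,31,30,31,31,30,31,30,31]
--
-- def isBisextile(y):
--     return (y%400 == 0 or (y%4 == 0 and y%100 !=0))
--
-- def nbSInDay():
--     return 3600*24
--
-- def nbSInMonth(m,b):
--     if (b):
--         return nbSInDay()*joursB[m]
--     else:
--         return nbSInDay()*jours[m]
--
-- def nbSInYear(y):
--     if (isBisextile(y)):
--         s = 0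
--         for i in range(1,13):
--             s += nbSInMonth(i,True)
--         return s
--     else:
--         s = 0
--         for i in range(1,13):
--             s += nbSInMonth(i,False)
--         return s
-- ===== SOURCE B (Python) =====
-- def isBisextile(y):
--     return (y%400 == 0 or (y%4 == 0 and y%100 !=0))
--
-- def nbSInYear(y):
--     return 86400 * (366 if isBisextile(y) else 365)
-- ===== Notes on version B (the rewrite author's own statement) =====
-- stated objective: simpler
-- what changed: Replaced the fixed month-summing loop over the per-month day-count tables with a single closed-form product: seconds per day times the leap-dependent number of days.
import Mathlib
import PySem

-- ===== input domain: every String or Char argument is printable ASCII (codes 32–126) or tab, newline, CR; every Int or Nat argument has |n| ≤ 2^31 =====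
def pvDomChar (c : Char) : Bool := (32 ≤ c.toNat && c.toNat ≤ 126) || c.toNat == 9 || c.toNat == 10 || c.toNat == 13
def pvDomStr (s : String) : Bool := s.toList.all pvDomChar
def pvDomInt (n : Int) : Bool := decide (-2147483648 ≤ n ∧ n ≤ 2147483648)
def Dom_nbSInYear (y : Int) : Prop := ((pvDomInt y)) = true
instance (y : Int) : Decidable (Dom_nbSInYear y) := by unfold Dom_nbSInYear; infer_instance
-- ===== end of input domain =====

-- B removes A's 12-iteration month-summing loop in favour of a closed-form 86400 * (366|365): simpler, same values.

-- ===== PORT A =====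
def jours : List Int := [0,31,28,31,30,31,30,31,31,30,31,30,31]
def joursB : List Int := [0,31,29,31,30,31,30,31,31,30,31,30,31]

def isBisextile (y : Int) : Bool :=
  PySem.Int.mod y 400 == 0 || (PySem.Int.mod y 4 == 0 && PySem.Int.mod y 100 != 0)

def nbSInDay : Int := 3600 * 24

-- joursB[m]/jours[m]: m ranges over 1..12 here, always in range; pyGetD is exact on that range
def nbSInMonth (m : Int) (b : Bool) : Int :=
  if b then nbSInDay * PySem.List.pyGetD joursB m 0
  else nbSInDay * PySem.List.pyGetD jours m 0

def nbSInYear (y : Int) : Int :=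
  if isBisextile y then
    (PySem.List.pyRange 1 13 1).foldl (fun s i => s + nbSInMonth i true) 0
  else
    (PySem.List.pyRange 1 13 1).foldl (fun s i => s + nbSInMonth i false) 0

-- ===== PORT B =====
def nbSInYear_alt (y : Int) : Int :=
  86400 * (if isBisextile y then 366 else 365)

-- ===== PRECONDITION & SPEC =====
def Spec_nbSInYear (y : Int) (out : Int) : Prop := out = nbSInYear_alt y
instance (y : Int) (out : Int) : Decidable (Spec_nbSInYear y out) := by unfold Spec_nbSInYear; infer_instance

-- ===== CLAIM (what is proved, stated in full; the proofs are below) =====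
def Claim_equal_nbSInYear : Prop := ∀ (y : Int), Dom_nbSInYear y → Spec_nbSInYear y (nbSInYear y)

-- ===== LEMMAS AND PROOFS =====

-- ===== VERDICT (by name: the statement is the Claim_ definition above) =====
theorem nbSInYear_spec : Claim_equal_nbSInYear := by
  intro y _
  unfold Spec_nbSInYear nbSInYear nbSInYear_alt
  by_cases h : isBisextile y = true <;> simp [h] <;> decide
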